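-- pv_equiv track=rewrite | github.com/LeonardoBringel/hamming-code | hamming_code.py | parity_range
-- ===== SOURCE A (Python) =====
-- def parity_range(bits, interator):
--     result = []
--     next_bit = interator - 1
--     cicle = interator
--
--     for index, bit in enumerate(bits):
--         if index == next_bit:
--             result.append(index)
--             cicle -= 1
--
--             if cicle == 0:
--                 next_bit += interator + 1
--                 cicle = interator
--             else:
--                 next_bit += 1
--     return result
-- ===== SOURCE B (Python) =====
-- def parity_range(bits, interator):
--     if interator <= 0:
--         return []
--     period = 2 * interator
--     return [i for i in range(len(bits))
--             if interator - 1 <= i % period <= 2 * interator - 2]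
-- ===== Notes on version B (the rewrite author's own statement) =====
-- stated objective: simpler
-- what changed: Replaces A's scan with a walking next_bit/cicle counter state by a stateless comprehension testing each index i against the closed-form residue condition interator-1 <= i % (2*interator) <= 2*interator-2 (guarding interator <= 0, where no index ever matches).
import Mathlib
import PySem

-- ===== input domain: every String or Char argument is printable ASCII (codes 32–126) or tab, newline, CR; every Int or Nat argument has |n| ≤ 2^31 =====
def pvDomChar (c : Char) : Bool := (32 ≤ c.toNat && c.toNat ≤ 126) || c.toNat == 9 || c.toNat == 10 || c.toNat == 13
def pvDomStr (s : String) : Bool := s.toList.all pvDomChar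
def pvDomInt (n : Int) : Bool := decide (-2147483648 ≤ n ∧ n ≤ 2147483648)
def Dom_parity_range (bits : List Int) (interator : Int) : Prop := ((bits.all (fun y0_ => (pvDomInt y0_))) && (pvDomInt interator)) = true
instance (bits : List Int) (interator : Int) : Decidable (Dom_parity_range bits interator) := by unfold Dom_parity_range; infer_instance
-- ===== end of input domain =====

-- B replaces A's single walking-counter scan by a direct membership test: index i is a
-- parity index iff interator-1 <= i % (2*interator) <= 2*interator-2 (objective: simpler).

-- ===== PORT A =====
-- loop body of A: state is (result, next_bit, cicle), p is (index, bit)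
def parityStepA (interator : Int) (st : List Int × Int × Int) (p : Int × Int) : List Int × Int × Int :=
  match st with
  | (result, next_bit, cicle) =>
    if p.1 = next_bit then
      if cicle - 1 = 0 then (result ++ [p.1], next_bit + interator + 1, interator)
      else (result ++ [p.1], next_bit + 1, cicle - 1)
    else (result, next_bit, cicle)

def parity_range (bits : List Int) (interator : Int) : List Int :=
  ((PySem.List.enumerate bits 0).foldl (parityStepA interator) ([], interator - 1, interator)).1

-- ===== PORT B =====
def parity_range_alt (bits : List Int) (interator : Int) : List Int :=
  if interator ≤ 0 then []
  else (PySem.List.pyRange 0 (PySem.List.len bits) 1).filter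
    (fun i => decide (interator - 1 ≤ PySem.Int.mod i (2 * interator) ∧
                      PySem.Int.mod i (2 * interator) ≤ 2 * interator - 2))

-- ===== PRECONDITION & SPEC =====
def Spec_parity_range (bits : List Int) (interator : Int) (out : List Int) : Prop := out = parity_range_alt bits interator
instance (bits : List Int) (interator : Int) (out : List Int) : Decidable (Spec_parity_range bits interator out) := by unfold Spec_parity_range; infer_instance

-- ===== CLAIM (what is proved, stated in full; the proofs are below) =====
def Claim_equal_parity_range : Prop := ∀ (bits : List Int) (interator : Int), Dom_parity_range bits interator → Spec_parity_range bits interator (parity_range bits interator)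

-- ===== LEMMAS AND PROOFS =====

-- When next_bit is already below every remaining index, A's loop never fires.
lemma foldA_of_lt (I : Int) (xs : List Int) :
    ∀ (s : Int) (res : List Int) (nb c : Int), nb < s →
    ((PySem.List.enumerate xs s).foldl (parityStepA I) (res, nb, c)).1 = res := by
  induction xs with
  | nil => intro s res nb c _; simp [PySem.List.enumerate_nil]
  | cons x xs ih =>
    intro s res nb c h
    rw [PySem.List.enumerate_cons]
    simp only [List.foldl_cons, parityStepA]
    rw [if_neg (by omega)]
    exact ih (s + 1) res nb c (by omega)

-- Main invariant: for I ≥ 1, A's loop from a consistent state appends exactly the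
-- indices of the remaining range that satisfy B's mod condition.
lemma foldA_inv (I : Int) (hI : 1 ≤ I) (xs : List Int) :
    ∀ (s : Int) (res : List Int) (nb c : Int),
    s ≤ nb → 1 ≤ c → c ≤ I → nb % (2 * I) = 2 * I - 1 - c →
    (∀ i : Int, s ≤ i → i < nb → ¬ (I - 1 ≤ i % (2 * I) ∧ i % (2 * I) ≤ 2 * I - 2)) →
    ((PySem.List.enumerate xs s).foldl (parityStepA I) (res, nb, c)).1
      = res ++ (PySem.List.pyRange s (s + xs.length) 1).filter
          (fun i => decide (I - 1 ≤ i % (2 * I) ∧ i % (2 * I) ≤ 2 * I - 2)) := by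
  induction xs with
  | nil =>
    intro s res nb c _ _ _ _ _
    rw [PySem.List.enumerate_nil]
    simp
  | cons x xs ih =>
    intro s res nb c hsnb hc1 hcI hmod hgap
    have h2I : (0 : Int) < 2 * I := by omega
    rw [PySem.List.enumerate_cons]
    simp only [List.foldl_cons, parityStepA]
    have hrange : PySem.List.pyRange s (s + (x :: xs).length) 1
        = s :: PySem.List.pyRange (s + 1) (s + 1 + xs.length) 1 := by
      have hlen : (s + ((x :: xs).length : Int)) = (s + 1) + (xs.length : Int) := by
        simp; ring
      rw [hlen, PySem.List.pyRange_one_cons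
        (by have := Int.natCast_nonneg xs.length; omega)]
    by_cases hs : s = nb
    · subst hs
      rw [if_pos rfl]
      have hconds : I - 1 ≤ s % (2 * I) ∧ s % (2 * I) ≤ 2 * I - 2 := by
        rw [hmod]; omega
      -- decompose s by its residue
      obtain ⟨q, hq⟩ : ∃ q, s = 2 * I * q + (2 * I - 1 - c) := by
        refine ⟨s / (2 * I), ?_⟩
        have := Int.emod_add_mul_ediv s (2 * I)
        omega
      have hq2 : 2 * I * (q + 1) = 2 * I * q + 2 * I := by ring
      by_cases hc : c - 1 = 0
      · rw [if_pos hc]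
        have hIc : c = 1 := by omega
        rw [ih (s + 1) (res ++ [s]) (s + I + 1) I (by omega) hI le_rfl ?_ ?_]
        · rw [hrange]
          rw [List.filter_cons_of_pos (by simpa using hconds), List.append_assoc]
          rfl
        · -- (s + I + 1).emod (2I) = I - 1
          have : s + I + 1 = (I - 1) + 2 * I * (q + 1) := by omega
          rw [this, Int.add_mul_emod_self_left, Int.emod_eq_of_lt (by omega) (by omega)]
          omega
        · -- gap s+1 .. s+I : residues 2I-1 then 0..I-2
          intro i hi1 hi2 hcond
          obtain ⟨hl, hr⟩ := hcond
          by_cases ht : i = s + 1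
          · -- residue 2I-1
            have : i = (2 * I - 1) + 2 * I * q := by omega
            rw [this, Int.add_mul_emod_self_left, Int.emod_eq_of_lt (by omega) (by omega)] at hr
            omega
          · -- i = s + t, 2 ≤ t ≤ I : residue t-2
            have : i = (i - s - 2) + 2 * I * (q + 1) := by omega
            rw [this, Int.add_mul_emod_self_left, Int.emod_eq_of_lt (by omega) (by omega)] at hl
            omega
      · rw [if_neg hc]
        rw [ih (s + 1) (res ++ [s]) (s + 1) (c - 1) le_rfl (by omega) (by omega) ?_ ?_]
        · rw [hrange]
          rw [List.filter_cons_of_pos (by simpa using hconds), List.append_assoc]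
          rfl
        · have : s + 1 = (2 * I - c) + 2 * I * q := by omega
          rw [this, Int.add_mul_emod_self_left, Int.emod_eq_of_lt (by omega) (by omega)]
          omega
        · intro i hi1 hi2; omega
    · rw [if_neg (by omega)]
      rw [ih (s + 1) res nb c (by omega) hc1 hcI hmod (fun i h1 h2 => hgap i (by omega) h2)]
      rw [hrange]
      rw [List.filter_cons_of_neg (by simpa using hgap s le_rfl (by omega))]

-- ===== VERDICT (by name: the statement is the Claim_ definition above) =====
theorem parity_range_spec : Claim_equal_parity_range := by
  intro bits I _
  unfold Spec_parity_range parity_range parity_range_alt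
  by_cases hI : I ≤ 0
  · rw [if_pos hI]
    exact foldA_of_lt I bits 0 [] (I - 1) I (by omega)
  · rw [if_neg hI]
    have hI1 : (1 : Int) ≤ I := by omega
    rw [foldA_inv I hI1 bits 0 [] (I - 1) I (by omega) hI1 le_rfl ?_ ?_]
    · rw [List.nil_append]
      simp only [PySem.List.len_eq, Int.zero_add]
      apply List.filter_congr
      intro i hi
      have hi0 : 0 ≤ i := (PySem.List.mem_pyRange_one.mp (by simpa using hi)).1
      rw [PySem.Int.mod_eq_emod_of_pos (by omega)]
    · rw [Int.emod_eq_of_lt (by omega) (by omega)]; omega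
    · intro i h1 h2 hcond
      rw [Int.emod_eq_of_lt (by omega) (by omega)] at hcond
      omega
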